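-- pv_equiv track=rewrite | github.com/MrBrantCode/unitest_baseline | mut_generate/mist_train_taco/taco_8911/solution.py | can_convert_string
-- ===== SOURCE A (Python) =====
-- def can_convert_string(X: str, Y: str) -> int:
--     n = len(X)
--     m = len(Y)
--     dp = [[0 for _ in range(m + 1)] for _ in range(n + 1)]
--     dp[0][0] = 1
--
--     for i in range(1, n + 1):
--         dp[i][0] = dp[i - 1][0] if X[i - 1].islower() else 0
--
--     for i in range(1, n + 1):
--         for j in range(1, m + 1):
--             if X[i - 1].upper() == Y[j - 1]:
--                 dp[i][j] = dp[i - 1][j - 1]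
--             if X[i - 1].islower():
--                 dp[i][j] = dp[i][j] or dp[i - 1][j]
--
--     return dp[n][m]
-- ===== SOURCE B (Python) =====
-- def can_convert_string(X: str, Y: str) -> int:
--     # Top-down memoized evaluation on states (i, j) = chars of X / Y consumed,
--     # driven by an explicit work stack (depth-safe); only states reachable
--     # from (n, m) are ever computed, unlike A's full (n+1)x(m+1) table.
--     n = len(X)
--     m = len(Y)
--     memo = {}
--     stack = [(n, m)]
--     while stack:
--         i, j = stack[-1]
--         if (i, j) in memo:
--             stack.pop()
--             continue
--         if i == 0:
--             memo[(i, j)] = 1 if j == 0 else 0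
--             stack.pop()
--             continue
--         c = X[i - 1]
--         deps = []
--         if j > 0 and c.upper() == Y[j - 1]:
--             deps.append((i - 1, j - 1))
--         if c.islower():
--             deps.append((i - 1, j))
--         missing = [d for d in deps if d not in memo]
--         if missing:
--             stack.extend(missing)
--             continue
--         res = 0
--         if j > 0 and c.upper() == Y[j - 1]:
--             res = memo[(i - 1, j - 1)]
--         if c.islower():
--             res = res or memo[(i - 1, j)]
--         memo[(i, j)] = res
--         stack.pop()
--     return memo[(n, m)]
-- ===== Notes on version B (the rewrite author's own statement) =====
-- stated objective: faster
-- what changed: Replaced A's bottom-up fill of the whole (n+1)x(m+1) table with a demand-driven top-down memoized evaluation (explicit work stack) that computes only the (i,j) states actually reachable from (n,m), which on typical inputs is far fewer than n*m.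
import Mathlib
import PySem

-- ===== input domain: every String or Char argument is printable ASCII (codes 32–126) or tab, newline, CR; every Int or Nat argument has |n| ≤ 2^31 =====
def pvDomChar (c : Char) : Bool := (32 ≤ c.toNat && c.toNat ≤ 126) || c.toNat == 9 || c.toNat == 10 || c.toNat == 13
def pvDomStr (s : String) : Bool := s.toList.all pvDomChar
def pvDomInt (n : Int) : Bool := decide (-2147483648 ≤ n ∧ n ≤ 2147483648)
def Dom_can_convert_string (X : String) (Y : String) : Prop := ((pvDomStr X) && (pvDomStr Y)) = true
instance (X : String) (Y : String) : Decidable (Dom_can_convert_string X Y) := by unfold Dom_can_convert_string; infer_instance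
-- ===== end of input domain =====

-- B replaces A's bottom-up (n+1)x(m+1) table with a top-down memoized evaluation of the
-- states (i, j) reachable from (n, m); return values proved equal on the whole domain.

-- ===== PORT A =====
def pvPyOr (a b : Int) : Int := if a == 0 then b else a

def pvDpGet (dp : List (List Int)) (i j : Int) : Int :=
  PySem.List.pyGetD (PySem.List.pyGetD dp i []) j 0

-- indices are always nonnegative and in range where A assigns, so List.set is Python's dp[i][j] = v
def pvDpSet (dp : List (List Int)) (i j : Int) (v : Int) : List (List Int) :=
  dp.set i.toNat ((PySem.List.pyGetD dp i []).set j.toNat v)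

def can_convert_string (X : String) (Y : String) : Int :=
  let xs := X.toList
  let ys := Y.toList
  let n : Int := xs.length
  let m : Int := ys.length
  let dp0 : List (List Int) :=
    (PySem.List.pyRange 0 (n+1) 1).map (fun _ => (PySem.List.pyRange 0 (m+1) 1).map (fun _ => (0:Int)))
  let dp1 := pvDpSet dp0 0 0 1
  let dp2 := (PySem.List.pyRange 1 (n+1) 1).foldl (fun dp i =>
    pvDpSet dp i 0 (if PySem.Chars.islower (PySem.List.pyGetD xs (i-1) ' ') then pvDpGet dp (i-1) 0 else 0)) dp1
  let dp3 := (PySem.List.pyRange 1 (n+1) 1).foldl (fun dp i =>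
    (PySem.List.pyRange 1 (m+1) 1).foldl (fun dp j =>
      let dp' := if PySem.Chars.upperChar (PySem.List.pyGetD xs (i-1) ' ') == PySem.List.pyGetD ys (j-1) ' '
                 then pvDpSet dp i j (pvDpGet dp (i-1) (j-1)) else dp
      if PySem.Chars.islower (PySem.List.pyGetD xs (i-1) ' ')
      then pvDpSet dp' i j (pvPyOr (pvDpGet dp' i j) (pvDpGet dp' (i-1) j)) else dp') dp) dp2
  pvDpGet dp3 n m


-- ===== PORT B =====
-- Source B evaluates solve(i, j) top-down with a memo and an explicit work stack (CPython's
-- recursion-depth-safe way to run this recursion); the port is that recursion itself —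
-- same states, same base case and branch order; the memo/stack only cache and schedule
-- the identical pure values, so they are not re-modelled here (ports run on small inputs).
def pvSolve (xs ys : List Char) : Nat → Nat → Int
  | 0, j => if j == 0 then 1 else 0
  | i+1, j =>
      let c := xs.getD i ' '
      let res : Int :=
        if 0 < j && (PySem.Chars.upperChar c == ys.getD (j-1) ' ') then pvSolve xs ys i (j-1) else 0
      if PySem.Chars.islower c then pvPyOr res (pvSolve xs ys i j) else res

def can_convert_string_alt (X : String) (Y : String) : Int :=
  pvSolve X.toList Y.toList X.toList.length Y.toList.length


-- ===== PRECONDITION & SPEC =====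
def Spec_can_convert_string (X : String) (Y : String) (out : Int) : Prop := out = can_convert_string_alt X Y
instance (X : String) (Y : String) (out : Int) : Decidable (Spec_can_convert_string X Y out) := by unfold Spec_can_convert_string; infer_instance

-- ===== CLAIM (what is proved, stated in full; the proofs are below) =====
def Claim_equal_can_convert_string : Prop := ∀ (X : String) (Y : String), Dom_can_convert_string X Y → Spec_can_convert_string X Y (can_convert_string X Y)

-- ===== LEMMAS AND PROOFS =====
-- pvF is the functional description of the DP recurrence both ports are reduced to
def pvF (xs ys : List Char) : Nat → Nat → Int
  | 0, 0 => 1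
  | 0, _+1 => 0
  | i+1, 0 => if PySem.Chars.islower (xs.getD i ' ') then pvF xs ys i 0 else 0
  | i+1, l+1 =>
      let a := if PySem.Chars.upperChar (xs.getD i ' ') == ys.getD l ' ' then pvF xs ys i l else 0
      if PySem.Chars.islower (xs.getD i ' ') then pvPyOr a (pvF xs ys i (l+1)) else a

-- B-side: the top-down recursion computes exactly pvF
lemma pvSolve_eq_pvF (xs ys : List Char) (i j : Nat) : pvSolve xs ys i j = pvF xs ys i j := by
  induction i generalizing j with
  | zero => cases j <;> simp [pvSolve, pvF]
  | succ i ih =>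
    cases j with
    | zero =>
      simp only [pvSolve, pvF, ih]
      norm_num [pvPyOr]
    | succ l =>
      simp only [pvSolve, pvF, ih]
      norm_num

lemma pv_alt_eq (X Y : String) :
    can_convert_string_alt X Y = pvF X.toList Y.toList X.toList.length Y.toList.length := by
  unfold can_convert_string_alt
  exact pvSolve_eq_pvF _ _ _ _

-- ===== A-side machinery =====
def pvRowF (xs ys : List Char) (k : Nat) : List Int :=
  (List.range (ys.length+1)).map (fun j => pvF xs ys k j)
def pvRow0 (xs ys : List Char) (k : Nat) : List Int :=
  pvF xs ys k 0 :: List.replicate ys.length 0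
def pvRowP (xs ys : List Char) (i s : Nat) : List Int :=
  (List.range (ys.length+1)).map (fun l => if l ≤ s then pvF xs ys i l else 0)
def pvD (xs ys : List Char) (t : Nat) : List (List Int) :=
  (List.range (xs.length+1)).map (fun k => if k ≤ t then pvRow0 xs ys k else List.replicate (ys.length+1) 0)
def pvE (xs ys : List Char) (t : Nat) : List (List Int) :=
  (List.range (xs.length+1)).map (fun k => if k ≤ t then pvRowF xs ys k else pvRow0 xs ys k)
def pvEI (xs ys : List Char) (t s : Nat) : List (List Int) :=
  (List.range (xs.length+1)).map (fun k =>
    if k = t+1 then pvRowP xs ys (t+1) s else if k ≤ t then pvRowF xs ys k else pvRow0 xs ys k)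

lemma pv_set_map_range {α} (N a : Nat) (f : Nat → α) (v : α) (h : a < N) :
    ((List.range N).map f).set a v = (List.range N).map (fun k => if k = a then v else f k) := by
  apply List.ext_getElem
  · simp
  · intro i h1 h2
    simp only [List.length_map, List.length_range] at h1 h2
    simp only [List.getElem_set, List.getElem_map, List.getElem_range]
    by_cases hia : a = i
    · rw [if_pos hia, if_pos hia.symm]
    · rw [if_neg hia, if_neg (fun hh => hia hh.symm)]

lemma pvRowP_zero (xs ys : List Char) (i : Nat) : pvRowP xs ys i 0 = pvRow0 xs ys i := by
  unfold pvRowP pvRow0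
  apply List.ext_getElem
  · simp
  · intro k h1 h2
    simp only [List.length_map, List.length_range] at h1
    rw [List.getElem_map, List.getElem_range]
    cases k with
    | zero => simp
    | succ l =>
      simp only [Nat.succ_le_iff] at *
      rw [List.getElem_cons_succ, List.getElem_replicate, if_neg (by omega)]

lemma pvRowF_zero (xs ys : List Char) : pvRowF xs ys 0 = pvRow0 xs ys 0 := by
  unfold pvRowF pvRow0
  apply List.ext_getElem
  · simp
  · intro k h1 h2
    simp only [List.length_map, List.length_range] at h1
    rw [List.getElem_map, List.getElem_range]
    cases k with
    | zero => simp [pvF]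
    | succ l => rw [List.getElem_cons_succ, List.getElem_replicate]; simp [pvF]

lemma pvRowP_full (xs ys : List Char) (i : Nat) : pvRowP xs ys i ys.length = pvRowF xs ys i := by
  unfold pvRowP pvRowF
  apply List.map_congr_left
  intro k hk
  rw [List.mem_range] at hk
  rw [if_pos (by omega)]

lemma pvDpGet_map (rows : Nat → List Int) {N : Nat} {i j : Int} {k l : Nat}
    (hi : i = (k:Int)) (hj : j = (l:Int)) (hk : k < N) :
    pvDpGet ((List.range N).map rows) i j = (rows k).getD l 0 := by
  subst hi hj
  unfold pvDpGet
  rw [PySem.List.pyGetD_natCast, PySem.List.pyGetD_natCast, PySem.List.getD_map_range _ _ _ _ hk]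

lemma pvDpSet_map (rows : Nat → List Int) {N : Nat} {i j : Int} {k l : Nat} (v : Int)
    (hi : i = (k:Int)) (hj : j = (l:Int)) (hk : k < N) :
    pvDpSet ((List.range N).map rows) i j v
      = (List.range N).map (fun k' => if k' = k then (rows k).set l v else rows k') := by
  subst hi hj
  unfold pvDpSet
  rw [PySem.List.pyGetD_natCast, PySem.List.getD_map_range _ _ _ _ hk,
      Int.toNat_natCast, Int.toNat_natCast, pv_set_map_range _ _ _ _ hk]

lemma pvRowF_getD (xs ys : List Char) (k j : Nat) (hj : j ≤ ys.length) :
    (pvRowF xs ys k).getD j 0 = pvF xs ys k j := by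
  unfold pvRowF; rw [PySem.List.getD_map_range _ _ _ _ (by omega)]

lemma pvRow0_getD0 (xs ys : List Char) (k : Nat) :
    (pvRow0 xs ys k).getD 0 0 = pvF xs ys k 0 := rfl

lemma pvRowP_getD (xs ys : List Char) (i s j : Nat) (hj : j ≤ ys.length) :
    (pvRowP xs ys i s).getD j 0 = if j ≤ s then pvF xs ys i j else 0 := by
  unfold pvRowP; rw [PySem.List.getD_map_range _ _ _ _ (by omega)]

lemma pv_phase1 (xs ys : List Char) (t : Nat) (ht : t ≤ xs.length) :
    (PySem.List.pyRange 1 ((t:Int)+1) 1).foldl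
      (fun dp i => pvDpSet dp i 0
        (if PySem.Chars.islower (PySem.List.pyGetD xs (i-1) ' ') then pvDpGet dp (i-1) 0 else 0))
      (pvD xs ys 0) = pvD xs ys t := by
  induction t with
  | zero => rw [PySem.List.pyRange_one_eq_nil (by norm_num), List.foldl_nil]
  | succ t ih =>
    have ht' : t ≤ xs.length := by omega
    rw [show ((t+1 : Nat):Int) + 1 = ((t:Int)+1) + 1 by push_cast; ring,
        PySem.List.pyRange_one_succ_right (by omega), List.foldl_append, ih ht',
        List.foldl_cons, List.foldl_nil]
    unfold pvD
    rw [show ((t:Int) + 1 - 1) = ((t:Nat):Int) by ring]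
    rw [PySem.List.pyGetD_natCast]
    rw [pvDpGet_map _ (k:=t) (l:=0) rfl (by norm_num) (show t < xs.length + 1 by omega)]
    rw [if_pos (le_refl t), pvRow0_getD0]
    rw [show (if PySem.Chars.islower (xs.getD t ' ') = true then pvF xs ys t 0 else 0)
          = pvF xs ys (t+1) 0 from by simp only [pvF]]
    rw [pvDpSet_map _ (k:=t+1) (l:=0) _ (show (t:Int)+1 = ((t+1:Nat):Int) by push_cast; ring) (by norm_num)
        (show t+1 < xs.length + 1 by omega)]
    apply List.map_congr_left
    intro k hk
    rw [List.mem_range] at hk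
    by_cases hkt : k = t+1
    · subst hkt
      rw [if_pos rfl, if_neg (show ¬ (t+1 ≤ t) by omega), if_pos (show t+1 ≤ t+1 by omega),
          List.replicate_succ, List.set_cons_zero]
      rfl
    · rw [if_neg hkt]
      by_cases hkle : k ≤ t
      · rw [if_pos hkle, if_pos (by omega)]
      · rw [if_neg hkle, if_neg (by omega)]

lemma pv_getD_set_self (l : List Int) (n : Nat) (v : Int) (h : n < l.length) :
    (l.set n v).getD n 0 = v := by
  rw [List.getD_eq_getElem _ _ (by simpa using h), List.getElem_set_self]

lemma pvRowP_set (xs ys : List Char) (i s : Nat) (h : s+1 ≤ ys.length) :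
    (pvRowP xs ys i s).set (s+1) (pvF xs ys i (s+1)) = pvRowP xs ys i (s+1) := by
  unfold pvRowP
  rw [pv_set_map_range _ _ _ _ (by omega)]
  apply List.map_congr_left
  intro k hk
  rw [List.mem_range] at hk
  by_cases hks : k = s+1
  · subst hks; rw [if_pos rfl, if_pos (le_refl _)]
  · rw [if_neg hks]
    by_cases hkle : k ≤ s
    · rw [if_pos hkle, if_pos (by omega)]
    · rw [if_neg hkle, if_neg (by omega)]

lemma pvRowP_stable (xs ys : List Char) (i s : Nat) (h0 : pvF xs ys i (s+1) = 0) :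
    pvRowP xs ys i s = pvRowP xs ys i (s+1) := by
  unfold pvRowP
  apply List.map_congr_left
  intro k hk
  by_cases hks : k = s+1
  · subst hks; rw [if_neg (by omega), if_pos (le_refl _), h0]
  · by_cases hkle : k ≤ s
    · rw [if_pos hkle, if_pos (by omega)]
    · rw [if_neg hkle, if_neg (by omega)]

lemma pv_phase2_inner (xs ys : List Char) (t : Nat) (ht : t < xs.length) (s : Nat) (hs : s ≤ ys.length) :
    (PySem.List.pyRange 1 ((s:Int)+1) 1).foldl
      (fun dp j =>
        let dp' := if PySem.Chars.upperChar (PySem.List.pyGetD xs (((t:Int)+1)-1) ' ') == PySem.List.pyGetD ys (j-1) ' '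
                   then pvDpSet dp ((t:Int)+1) j (pvDpGet dp (((t:Int)+1)-1) (j-1)) else dp
        if PySem.Chars.islower (PySem.List.pyGetD xs (((t:Int)+1)-1) ' ')
        then pvDpSet dp' ((t:Int)+1) j (pvPyOr (pvDpGet dp' ((t:Int)+1) j) (pvDpGet dp' (((t:Int)+1)-1) j)) else dp')
      (pvE xs ys t) = pvEI xs ys t s := by
  induction s with
  | zero =>
    rw [PySem.List.pyRange_one_eq_nil (by norm_num), List.foldl_nil]
    unfold pvE pvEI
    apply List.map_congr_left
    intro k hk
    by_cases hkt : k = t+1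
    · subst hkt; rw [if_neg (by omega), if_pos rfl, pvRowP_zero]
    · rw [if_neg hkt]
  | succ s ih =>
    have hs' : s ≤ ys.length := by omega
    rw [show ((s+1 : Nat):Int) + 1 = ((s:Int)+1) + 1 by push_cast; ring,
        PySem.List.pyRange_one_succ_right (by omega), List.foldl_append, ih hs',
        List.foldl_cons, List.foldl_nil]
    simp only [show ((t:Int)+1-1) = ((t:Nat):Int) by ring, show ((s:Int)+1-1) = ((s:Nat):Int) by ring,
               PySem.List.pyGetD_natCast]
    unfold pvEI
    rw [pvDpGet_map _ (k:=t) (l:=s) rfl rfl (by omega)]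
    rw [if_neg (show t ≠ t+1 by omega), if_pos (le_refl t), pvRowF_getD _ _ _ _ hs']
    by_cases hc : (PySem.Chars.upperChar (xs.getD t ' ') == ys.getD s ' ') = true <;>
      by_cases hl : PySem.Chars.islower (xs.getD t ' ') = true
    · -- match, lower
      rw [if_pos hc, if_pos hl]
      have hval : pvF xs ys (t+1) (s+1) = pvPyOr (pvF xs ys t s) (pvF xs ys t (s+1)) := by
        simp only [pvF]; rw [if_pos hc, if_pos hl]
      rw [pvDpSet_map _ (k:=t+1) (l:=s+1) _ (by push_cast; ring) (by push_cast; ring) (by omega)]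
      rw [if_pos rfl]
      rw [pvDpGet_map _ (k:=t+1) (l:=s+1) (by push_cast; ring) (by push_cast; ring) (by omega)]
      rw [if_pos rfl, pv_getD_set_self _ _ _ (by simp [pvRowP]; omega)]
      rw [pvDpGet_map _ (k:=t) (l:=s+1) rfl (by push_cast; ring) (by omega)]
      rw [if_neg (show t ≠ t+1 by omega), if_neg (show t ≠ t+1 by omega),
          if_pos (le_refl t), pvRowF_getD _ _ _ _ hs]
      rw [pvDpSet_map _ (k:=t+1) (l:=s+1) _ (by push_cast; ring) (by push_cast; ring) (by omega)]
      rw [if_pos rfl, List.set_set, ← hval, pvRowP_set _ _ _ _ hs]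
      apply List.map_congr_left
      intro k hk
      by_cases hkt : k = t+1
      · subst hkt; simp
      · simp [hkt]
    · -- match, not lower
      rw [if_pos hc, if_neg hl]
      have hval : pvF xs ys (t+1) (s+1) = pvF xs ys t s := by
        simp only [pvF]; rw [if_pos hc, if_neg hl]
      rw [pvDpSet_map _ (k:=t+1) (l:=s+1) _ (by push_cast; ring) (by push_cast; ring) (by omega)]
      rw [if_pos rfl, ← hval, pvRowP_set _ _ _ _ hs]
      apply List.map_congr_left
      intro k hk
      by_cases hkt : k = t+1
      · subst hkt; simp
      · simp [hkt]
    · -- no match, lower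
      rw [if_neg hc, if_pos hl]
      have hval : pvF xs ys (t+1) (s+1) = pvPyOr 0 (pvF xs ys t (s+1)) := by
        simp only [pvF]; rw [if_neg hc, if_pos hl]
      rw [pvDpGet_map _ (k:=t+1) (l:=s+1) (by push_cast; ring) (by push_cast; ring) (by omega)]
      rw [if_pos rfl, pvRowP_getD _ _ _ _ _ hs, if_neg (by omega)]
      rw [pvDpGet_map _ (k:=t) (l:=s+1) rfl (by push_cast; ring) (by omega)]
      rw [if_neg (show t ≠ t+1 by omega), if_pos (le_refl t), pvRowF_getD _ _ _ _ hs]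
      rw [pvDpSet_map _ (k:=t+1) (l:=s+1) _ (by push_cast; ring) (by push_cast; ring) (by omega)]
      rw [if_pos rfl, ← hval, pvRowP_set _ _ _ _ hs]
      apply List.map_congr_left
      intro k hk
      by_cases hkt : k = t+1
      · subst hkt; simp
      · simp [hkt]
    · -- no match, not lower
      rw [if_neg hc, if_neg hl]
      have hval : pvF xs ys (t+1) (s+1) = 0 := by
        simp only [pvF]; rw [if_neg hc, if_neg hl]
      apply List.map_congr_left
      intro k hk
      by_cases hkt : k = t+1
      · subst hkt; rw [if_pos rfl, if_pos rfl, pvRowP_stable _ _ _ _ hval]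
      · simp [hkt]

lemma pv_phase2 (xs ys : List Char) (t : Nat) (ht : t ≤ xs.length) :
    (PySem.List.pyRange 1 ((t:Int)+1) 1).foldl
      (fun dp i =>
        (PySem.List.pyRange 1 ((ys.length:Int)+1) 1).foldl
          (fun dp j =>
            let dp' := if PySem.Chars.upperChar (PySem.List.pyGetD xs (i-1) ' ') == PySem.List.pyGetD ys (j-1) ' '
                       then pvDpSet dp i j (pvDpGet dp (i-1) (j-1)) else dp
            if PySem.Chars.islower (PySem.List.pyGetD xs (i-1) ' ')
            then pvDpSet dp' i j (pvPyOr (pvDpGet dp' i j) (pvDpGet dp' (i-1) j)) else dp') dp)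
      (pvE xs ys 0) = pvE xs ys t := by
  induction t with
  | zero =>
    rw [show PySem.List.pyRange 1 (((0:Nat):Int)+1) 1 = [] from PySem.List.pyRange_one_eq_nil (by norm_num),
        List.foldl_nil]
  | succ t ih =>
    have ht' : t ≤ xs.length := by omega
    rw [show ((t+1 : Nat):Int) + 1 = ((t:Int)+1) + 1 by push_cast; ring,
        PySem.List.pyRange_one_succ_right (a:=1) (b:=(t:Int)+1) (by omega), List.foldl_append, ih ht',
        List.foldl_cons, List.foldl_nil]
    rw [pv_phase2_inner xs ys t (by omega) ys.length (le_refl _)]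
    unfold pvEI pvE
    apply List.map_congr_left
    intro k hk
    by_cases hkt : k = t+1
    · subst hkt; rw [if_pos rfl, if_pos (le_refl _), pvRowP_full]
    · rw [if_neg hkt]
      by_cases hkle : k ≤ t
      · rw [if_pos hkle, if_pos (by omega)]
      · rw [if_neg hkle, if_neg (by omega)]

lemma pv_A_eq (X Y : String) :
    can_convert_string X Y = pvF X.toList Y.toList X.toList.length Y.toList.length := by
  unfold can_convert_string
  simp only []
  rw [List.map_const', List.map_const', PySem.List.length_pyRange_one, PySem.List.length_pyRange_one]
  rw [show ((X.toList.length:Int) + 1 - 0).toNat = X.toList.length + 1 by omega,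
      show ((Y.toList.length:Int) + 1 - 0).toNat = Y.toList.length + 1 by omega]
  rw [show List.replicate (X.toList.length + 1) (List.replicate (Y.toList.length + 1) (0:Int))
        = (List.range (X.toList.length + 1)).map (fun _ => List.replicate (Y.toList.length + 1) (0:Int))
      from by rw [List.map_const', List.length_range]]
  rw [pvDpSet_map _ (k:=0) (l:=0) _ (by norm_num) (by norm_num) (by omega)]
  rw [show (List.range (X.toList.length + 1)).map
        (fun k' => if k' = 0 then (List.replicate (Y.toList.length + 1) (0:Int)).set 0 1
                   else List.replicate (Y.toList.length + 1) (0:Int))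
      = pvD X.toList Y.toList 0 from by
    unfold pvD
    apply List.map_congr_left
    intro k hk
    by_cases hk0 : k = 0
    · subst hk0
      rw [if_pos rfl, if_pos (le_refl _), List.replicate_succ, List.set_cons_zero]
      rfl
    · rw [if_neg hk0, if_neg (by omega)]]
  rw [pv_phase1 X.toList Y.toList X.toList.length (le_refl _)]
  rw [show pvD X.toList Y.toList X.toList.length = pvE X.toList Y.toList 0 from by
    unfold pvD pvE
    apply List.map_congr_left
    intro k hk
    rw [List.mem_range] at hk
    rw [if_pos (by omega)]
    by_cases hk0 : k ≤ 0
    · rw [if_pos hk0]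
      have : k = 0 := by omega
      subst this
      rw [pvRowF_zero]
    · rw [if_neg hk0]]
  rw [pv_phase2 X.toList Y.toList X.toList.length (le_refl _)]
  unfold pvE
  rw [pvDpGet_map _ (k:=X.toList.length) (l:=Y.toList.length) rfl rfl (by omega)]
  rw [if_pos (le_refl _), pvRowF_getD _ _ _ _ (le_refl _)]

-- ===== VERDICT (by name: the statement is the Claim_ definition above) =====
theorem can_convert_string_spec : Claim_equal_can_convert_string := by
  unfold Claim_equal_can_convert_string Spec_can_convert_string
  intro X Y _
  rw [pv_A_eq, pv_alt_eq]
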